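-- pv_equiv track=rewrite | github.com/keigoks-ivan/morning-briefing | briefing/html_template.py | _mkt_row
-- ===== SOURCE A (Python) =====
-- MKT_CHG_COLOR = {"pos": "#0F6E56", "neg": "#C0392B", "neu": "#888"}
--
-- def _mkt_cell(item: dict, extra_tag: str = "") -> str:
--     """Render one market data cell (table-based, email-safe)."""
--     d = item.get("dir", "neu")
--     color = MKT_CHG_COLOR.get(d, "#888")
--     is_dyn = item.get("is_dynamic", False)
--     dyn_html = ('<span style="font-size:9px;color:#C0392B;font-weight:600;'
--                 'position:absolute;top:4px;right:6px;">動態</span>') if is_dyn else ""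
--     return (f'<td style="padding:8px 10px;border-right:0.5px solid #f0f0f0;vertical-align:top;'
--             f'position:relative;">'
--             f'{dyn_html}'
--             f'<div style="font-size:11px;text-transform:uppercase;letter-spacing:0.5px;'
--             f'color:#888;margin-bottom:3px;">{item.get("label","—")}</div>'
--             f'<div style="font-size:18px;font-weight:500;color:#222;margin-bottom:2px;">'
--             f'{item.get("val","—")}</div>'
--             f'<div style="font-size:12px;color:{color};">{item.get("chg","—")}</div>'
--             f'{extra_tag}'
--             f'</td>')
--
-- def _mkt_row(items: list[dict], extra_tags: dict | None = None, max_per_row: int = 6) -> str: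
--     """Render table rows of market cells, max_per_row items per <tr>."""
--     if not items:
--         return ""
--     html = ""
--     for i, it in enumerate(items):
--         if i % max_per_row == 0:
--             if i > 0:
--                 html += "</tr>"
--             html += "<tr>"
--         tag = (extra_tags or {}).get(i, "")
--         html += _mkt_cell(it, extra_tag=tag)
--     html += "</tr>"
--     return html
-- ===== SOURCE B (Python) =====
-- MKT_CHG_COLOR = {"pos": "#0F6E56", "neg": "#C0392B", "neu": "#888"}
--
-- def _cell_b(item, tag):
--     color = MKT_CHG_COLOR.get(item.get("dir", "neu"), "#888")
--     parts = ['<td style="padding:8px 10px;border-right:0.5px solid #f0f0f0;vertical-align:top;'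
--              'position:relative;">']
--     if item.get("is_dynamic", False):
--         parts.append('<span style="font-size:9px;color:#C0392B;font-weight:600;'
--                      'position:absolute;top:4px;right:6px;">動態</span>')
--     parts.append('<div style="font-size:11px;text-transform:uppercase;letter-spacing:0.5px;'
--                  'color:#888;margin-bottom:3px;">' + item.get("label", "—") + '</div>')
--     parts.append('<div style="font-size:18px;font-weight:500;color:#222;margin-bottom:2px;">'
--                  + item.get("val", "—") + '</div>')
--     parts.append('<div style="font-size:12px;color:' + color + ';">' + item.get("chg", "—") + '</div>')
--     parts.append(tag)
--     parts.append('</td>')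
--     return ''.join(parts)
--
-- def _mkt_row(items, extra_tags=None, max_per_row=6):
--     if not items:
--         return ""
--     tags = extra_tags or {}
--     rows = []
--     for base in range(0, len(items), max_per_row):
--         cells = "".join(_cell_b(it, tags.get(base + j, ""))
--                         for j, it in enumerate(items[base:base + max_per_row]))
--         rows.append("<tr>" + cells + "</tr>")
--     return "".join(rows)
-- ===== Notes on version B (the rewrite author's own statement) =====
-- stated objective: alternative
-- what changed: B renders the table by iterating over row-start offsets and slicing items into chunks of max_per_row (outer loop over rows, inner join over each chunk's cells, cells built as joined parts lists) instead of A's single flat pass tracking i % max_per_row; Pre_ restricts nonempty inputs to the natural domain max_per_row >= 1, outside which A raises ZeroDivisionError (at 0) or its grouping is an accident of Python's negative modulo (at negative values).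
-- outside the precondition, e.g. on _mkt_row([{'label': 'x'}], None, 0): A raises ZeroDivisionError, B raises ValueError
import Mathlib
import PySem

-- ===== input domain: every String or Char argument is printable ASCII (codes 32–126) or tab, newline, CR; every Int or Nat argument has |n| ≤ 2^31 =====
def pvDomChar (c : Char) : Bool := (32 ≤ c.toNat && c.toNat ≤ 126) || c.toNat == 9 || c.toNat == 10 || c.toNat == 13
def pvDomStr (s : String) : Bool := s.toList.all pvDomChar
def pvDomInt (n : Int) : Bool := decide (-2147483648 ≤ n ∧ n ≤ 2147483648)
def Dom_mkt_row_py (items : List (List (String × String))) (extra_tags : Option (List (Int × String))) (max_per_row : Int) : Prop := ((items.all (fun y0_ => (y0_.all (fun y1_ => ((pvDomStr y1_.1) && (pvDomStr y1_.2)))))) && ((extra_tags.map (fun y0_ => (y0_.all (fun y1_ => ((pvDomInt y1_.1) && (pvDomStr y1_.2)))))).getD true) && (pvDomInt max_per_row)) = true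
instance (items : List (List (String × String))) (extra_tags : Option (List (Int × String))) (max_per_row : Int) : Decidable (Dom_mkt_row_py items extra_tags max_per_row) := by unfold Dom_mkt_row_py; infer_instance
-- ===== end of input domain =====

-- B renders the rows chunk by chunk (outer loop over row starts, inner loop over each
-- chunk's cells) instead of A's flat index-modulo pass; objective: alternative decomposition.

-- ===== PORT A =====
-- shared Python primitives: dict.get on a str-keyed dict (first match), truthiness of
-- item.get("is_dynamic", False) for string values, and (extra_tags or {}).get(i, "")
def pvMKT_CHG_COLOR : List (String × String) := [("pos", "#0F6E56"), ("neg", "#C0392B"), ("neu", "#888")]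

def pvDictGet (d : List (String × String)) (k dflt : String) : String := (List.lookup k d).getD dflt

def pvIsDyn (item : List (String × String)) : Bool :=
  match List.lookup "is_dynamic" item with
  | some s => !(s == "")
  | none => false

def pvTagAt (extra_tags : Option (List (Int × String))) (i : Int) : String :=
  match extra_tags with
  | some d => (List.lookup i d).getD ""
  | none => ""

-- A's _mkt_cell: one f-string concatenation
def mktCell (item : List (String × String)) (extra_tag : String) : String :=
  let d := pvDictGet item "dir" "neu"
  let color := (List.lookup d pvMKT_CHG_COLOR).getD "#888"
  let dyn_html := if pvIsDyn item then "<span style=\"font-size:9px;color:#C0392B;font-weight:600;position:absolute;top:4px;right:6px;\">動態</span>" else ""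
  "<td style=\"padding:8px 10px;border-right:0.5px solid #f0f0f0;vertical-align:top;position:relative;\">"
    ++ dyn_html
    ++ "<div style=\"font-size:11px;text-transform:uppercase;letter-spacing:0.5px;color:#888;margin-bottom:3px;\">" ++ pvDictGet item "label" "—" ++ "</div>"
    ++ "<div style=\"font-size:18px;font-weight:500;color:#222;margin-bottom:2px;\">" ++ pvDictGet item "val" "—" ++ "</div>"
    ++ "<div style=\"font-size:12px;color:" ++ color ++ ";\">" ++ pvDictGet item "chg" "—" ++ "</div>"
    ++ extra_tag
    ++ "</td>"

def mkt_row_py (items : List (List (String × String))) (extra_tags : Option (List (Int × String))) (max_per_row : Int) : String :=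
  if items = [] then ""
  else
    (PySem.List.enumerate items 0).foldl
      (fun html p =>
        (if PySem.Int.mod p.1 max_per_row = 0 then
            (if p.1 > 0 then html ++ "</tr>" else html) ++ "<tr>"
          else html)
        ++ mktCell p.2 (pvTagAt extra_tags p.1)) ""
    ++ "</tr>"

-- ===== PORT B =====
-- B's _cell_b: a parts list joined at the end
def mktCellAlt (item : List (String × String)) (tag : String) : String :=
  let color := (List.lookup (pvDictGet item "dir" "neu") pvMKT_CHG_COLOR).getD "#888"
  let parts : List String := ["<td style=\"padding:8px 10px;border-right:0.5px solid #f0f0f0;vertical-align:top;position:relative;\">"]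
  let parts := if pvIsDyn item then parts ++ ["<span style=\"font-size:9px;color:#C0392B;font-weight:600;position:absolute;top:4px;right:6px;\">動態</span>"] else parts
  let parts := parts ++ ["<div style=\"font-size:11px;text-transform:uppercase;letter-spacing:0.5px;color:#888;margin-bottom:3px;\">" ++ pvDictGet item "label" "—" ++ "</div>"]
  let parts := parts ++ ["<div style=\"font-size:18px;font-weight:500;color:#222;margin-bottom:2px;\">" ++ pvDictGet item "val" "—" ++ "</div>"]
  let parts := parts ++ ["<div style=\"font-size:12px;color:" ++ color ++ ";\">" ++ pvDictGet item "chg" "—" ++ "</div>"]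
  let parts := parts ++ [tag, "</td>"]
  PySem.Str.join "" parts

def mkt_row_py_alt (items : List (List (String × String))) (extra_tags : Option (List (Int × String))) (max_per_row : Int) : String :=
  if items = [] then ""
  else
    PySem.Str.join ""
      ((PySem.List.pyRange 0 (items.length : Int) max_per_row).foldl
        (fun rows base =>
          rows ++ ["<tr>"
            ++ PySem.Str.join ""
              ((PySem.List.enumerate (PySem.List.slice items (some base) (some (base + max_per_row))) 0).map
                (fun q => mktCellAlt q.2 (pvTagAt extra_tags (base + q.1))))
            ++ "</tr>"]) [])

-- ===== PRECONDITION & SPEC =====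
-- Pre_ restricts nonempty inputs to the natural domain max_per_row ≥ 1: at max_per_row = 0
-- A raises ZeroDivisionError (and B's range raises ValueError), and a negative row width is
-- outside the function's natural domain, where A's grouping is an accident of Python's
-- negative modulo.
def Pre_mkt_row_py (items : List (List (String × String))) (extra_tags : Option (List (Int × String))) (max_per_row : Int) : Prop :=
  items = [] ∨ 1 ≤ max_per_row
instance (items : List (List (String × String))) (extra_tags : Option (List (Int × String))) (max_per_row : Int) : Decidable (Pre_mkt_row_py items extra_tags max_per_row) := by unfold Pre_mkt_row_py; infer_instance

def pvWitness_mkt_row_py : (List (List (String × String))) × (Option (List (Int × String))) × Int :=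
  ([[("label", "BTC"), ("val", "65k"), ("chg", "+1%"), ("dir", "pos")],
    [("label", "ETH"), ("chg", "-2%"), ("dir", "neg"), ("is_dynamic", "1")],
    [("val", "9")]],
   some [((0 : Int), "<br>"), ((2 : Int), "")], (2 : Int))

def Spec_mkt_row_py (items : List (List (String × String))) (extra_tags : Option (List (Int × String))) (max_per_row : Int) (out : String) : Prop := out = mkt_row_py_alt items extra_tags max_per_row
instance (items : List (List (String × String))) (extra_tags : Option (List (Int × String))) (max_per_row : Int) (out : String) : Decidable (Spec_mkt_row_py items extra_tags max_per_row out) := by unfold Spec_mkt_row_py; infer_instance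

-- ===== CLAIM (what is proved, stated in full; the proofs are below) =====
def Claim_equal_mkt_row_py : Prop := ∀ (items : List (List (String × String))) (extra_tags : Option (List (Int × String))) (max_per_row : Int), Dom_mkt_row_py items extra_tags max_per_row → Pre_mkt_row_py items extra_tags max_per_row → Spec_mkt_row_py items extra_tags max_per_row (mkt_row_py items extra_tags max_per_row)

-- ===== LEMMAS AND PROOFS =====

-- A's loop body, named for the proofs (definitionally the lambda in mkt_row_py)
def stepA (extra_tags : Option (List (Int × String))) (m : Int) (html : String) (p : Int × List (String × String)) : String :=
  (if PySem.Int.mod p.1 m = 0 then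
      (if p.1 > 0 then html ++ "</tr>" else html) ++ "<tr>"
    else html)
  ++ mktCell p.2 (pvTagAt extra_tags p.1)

-- the cells of one chunk, with absolute start index i
def cellsL (tags : Option (List (Int × String))) (i : Int) : List (List (String × String)) → String
  | [] => ""
  | it :: rest => mktCell it (pvTagAt tags i) ++ cellsL tags (i + 1) rest

-- the rows, chunked k at a time, start index s
def rowsR (k : Nat) (tags : Option (List (Int × String))) (s : Int) (its : List (List (String × String))) : String :=
  if h : its = [] ∨ k = 0 then ""
  else "<tr>" ++ cellsL tags s (its.take k) ++ "</tr>" ++ rowsR k tags (s + (k : Int)) (its.drop k)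
termination_by its.length
decreasing_by
  push_neg at h
  simp only [List.length_drop]
  have := List.length_pos_iff.mpr h.1
  omega

lemma rowsR_nil (k : Nat) (tags : Option (List (Int × String))) (s : Int) : rowsR k tags s [] = "" := by
  rw [rowsR]; simp

lemma rowsR_cons (k : Nat) (tags : Option (List (Int × String))) (s : Int)
    (its : List (List (String × String))) (h1 : its ≠ []) (h2 : k ≠ 0) :
    rowsR k tags s its = "<tr>" ++ cellsL tags s (its.take k) ++ "</tr>" ++ rowsR k tags (s + (k : Int)) (its.drop k) := by
  rw [rowsR, dif_neg (by tauto)]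

lemma pvJoin_nil : PySem.Str.join "" ([] : List String) = "" := by
  simp [PySem.Str.join, PySem.Chars.join, List.intercalate]

lemma pvJoin_cons (x : String) (xs : List String) :
    PySem.Str.join "" (x :: xs) = x ++ PySem.Str.join "" xs := by
  simp [PySem.Str.join, PySem.Chars.join, List.intercalate]
  cases xs <;> simp [List.intersperse]

lemma cellAlt_eq (item : List (String × String)) (tag : String) :
    mktCellAlt item tag = mktCell item tag := by
  unfold mktCell mktCellAlt
  cases hd : pvIsDyn item <;>
    simp only [hd, Bool.false_eq_true, reduceIte, pvJoin_cons, pvJoin_nil, List.cons_append,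
      List.nil_append, String.append_assoc, String.append_empty, String.empty_append]

-- pyRange with a positive step, peeled one element
lemma pvPyRange_cons (a b s : Int) (hs : 0 < s) (h : a < b) :
    PySem.List.pyRange a b s = a :: PySem.List.pyRange (a + s) b s := by
  rw [PySem.List.pyRange_of_pos _ _ hs, PySem.List.pyRange_of_pos _ _ hs]
  have hcount : (if a < b then ((b - a + s - 1) / s).toNat else 0)
      = (if a + s < b then ((b - (a + s) + s - 1) / s).toNat else 0) + 1 := by
    rw [if_pos h]
    by_cases h2 : a + s < b
    · rw [if_pos h2]
      have e1 : b - a + s - 1 = (b - (a + s) + s - 1) + 1 * s := by ring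
      have e2 : (b - a + s - 1) / s = (b - (a + s) + s - 1) / s + 1 := by
        rw [e1, Int.add_mul_ediv_right _ _ (by omega : s ≠ 0)]
      rw [e2]
      have hnn : 0 ≤ (b - (a + s) + s - 1) / s := Int.ediv_nonneg (by omega) (by omega)
      omega
    · rw [if_neg h2]
      have e1 : b - a + s - 1 = (b - a - 1) + 1 * s := by ring
      have h0 : (b - a - 1) / s = 0 := Int.ediv_eq_zero_of_lt (by omega) (by omega)
      have e2 : (b - a + s - 1) / s = 1 := by
        rw [e1, Int.add_mul_ediv_right _ _ (by omega : s ≠ 0), h0]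
        omega
      rw [e2]; omega
  rw [hcount, List.range_succ_eq_map]
  simp only [List.map_cons, List.map_map]
  refine congrArg₂ _ (by push_cast; ring) (List.map_congr_left ?_)
  intro x _
  simp only [Function.comp_apply]
  push_cast
  ring

-- A's loop over a chunk interior: no index is a multiple of m
lemma foldl_stepA_interior (tags : Option (List (Int × String))) (m : Int) :
    ∀ (chunk : List (List (String × String))) (s : Int) (html : String),
    (∀ t : Nat, t < chunk.length → ¬ (m ∣ (s + (t : Int)))) →
    (PySem.List.enumerate chunk s).foldl (stepA tags m) html = html ++ cellsL tags s chunk := by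
  intro chunk
  induction chunk with
  | nil => intro s html _; simp [cellsL, PySem.List.enumerate_nil, String.append_empty]
  | cons c ct ih =>
    intro s html h
    rw [PySem.List.enumerate_cons, List.foldl_cons]
    have h0 : ¬ (m ∣ s) := by simpa using h 0 (by simp)
    have hmod : ¬ (PySem.Int.mod s m = 0) := by
      rw [PySem.Int.mod_eq_zero_iff_dvd]; exact h0
    rw [ih (s + 1) _ (by
      intro t ht hd
      apply h (t + 1) (by simpa using Nat.succ_lt_succ ht)
      convert hd using 1
      push_cast; ring)]
    simp only [stepA, if_neg hmod, cellsL]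
    simp [String.append_assoc]

-- A's loop from a chunk boundary equals the chunked rendering
lemma foldl_stepA_main (tags : Option (List (Int × String))) (m : Int) (hm : m ≠ 0) :
    ∀ (N : Nat) (its : List (List (String × String))) (s : Int) (html : String),
    its.length ≤ N → m ∣ s → 0 ≤ s → (its = [] → 0 < s) →
    (PySem.List.enumerate its s).foldl (stepA tags m) html ++ "</tr>"
      = html ++ (if s = 0 then "" else "</tr>") ++ rowsR m.natAbs tags s its := by
  intro N
  induction N with
  | zero =>
    intro its s html hlen hdvd hs hne
    have hits : its = [] := by cases its with | nil => rfl | cons a r => simp at hlen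
    subst hits
    rw [rowsR_nil]
    have hs0 : ¬ (s = 0) := by have := hne rfl; omega
    simp [PySem.List.enumerate_nil, hs0, String.append_assoc]
  | succ N ih =>
    intro its s html hlen hdvd hs hne
    by_cases hits : its = []
    · subst hits
      rw [rowsR_nil]
      have hs0 : ¬ (s = 0) := by have := hne rfl; omega
      simp [PySem.List.enumerate_nil, hs0, String.append_assoc]
    · have hk : 0 < m.natAbs := Int.natAbs_pos.mpr hm
      obtain ⟨j, hj⟩ : ∃ j, m.natAbs = j + 1 := ⟨m.natAbs - 1, by omega⟩
      obtain ⟨it, rest0, hits'⟩ : ∃ it rest0, its = it :: rest0 := by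
        cases its with
        | nil => exact absurd rfl hits
        | cons a r => exact ⟨a, r, rfl⟩
      have hchunk : its.take m.natAbs = it :: rest0.take j := by
        rw [hits', hj, List.take_succ_cons]
      have hsplit : PySem.List.enumerate its s
          = PySem.List.enumerate (its.take m.natAbs) s
            ++ PySem.List.enumerate (its.drop m.natAbs) (s + ((its.take m.natAbs).length : Int)) := by
        conv_lhs => rw [← List.take_append_drop m.natAbs its]
        rw [PySem.List.enumerate_append]
      rw [hsplit, List.foldl_append, hchunk]
      have hmod0 : PySem.Int.mod s m = 0 := (PySem.Int.mod_eq_zero_iff_dvd s m).mpr hdvd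
      have hint : ∀ t : Nat, t < (rest0.take j).length → ¬ (m ∣ ((s + 1) + (t : Int))) := by
        intro t ht hdd
        have h1 : m ∣ ((s + 1 + (t : Int)) - s) := dvd_sub hdd hdvd
        have h2 : m ∣ (((1 + t : Nat) : Int)) := by
          convert h1 using 1; push_cast; ring
        have h3 : ((m.natAbs : Int)) ∣ (((1 + t : Nat) : Int)) := Int.natAbs_dvd.mpr h2
        have h4 : ((m.natAbs : Int)) ≤ (((1 + t : Nat) : Int)) :=
          Int.le_of_dvd (by positivity) h3
        have h4' : m.natAbs ≤ 1 + t := by exact_mod_cast h4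
        have h5 : t < j := by
          have := List.length_take_le j rest0
          omega
        omega
      rw [PySem.List.enumerate_cons, List.foldl_cons]
      rw [foldl_stepA_interior tags m (rest0.take j) (s + 1) (stepA tags m html (s, it)) hint]
      rw [rowsR_cons _ _ _ _ hits (by omega), hchunk]
      have hstep : stepA tags m html (s, it)
          = (if s > 0 then html ++ "</tr>" else html) ++ "<tr>" ++ mktCell it (pvTagAt tags s) := by
        simp [stepA, hmod0, String.append_assoc]
      by_cases hrest : its.drop m.natAbs = []
      · rw [hrest, rowsR_nil]
        simp only [PySem.List.enumerate_nil, List.foldl_nil, cellsL]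
        rw [hstep]
        by_cases hs0 : s = 0
        · subst hs0
          rw [if_neg (by omega : ¬ ((0 : Int) > 0)), if_pos rfl]
          simp only [String.append_assoc, String.append_empty, String.empty_append]
        · rw [if_pos (by omega : s > 0), if_neg hs0]
          simp only [String.append_assoc, String.append_empty]
      · have h1 : m.natAbs ≤ its.length := by
          by_contra hcon
          push_neg at hcon
          exact hrest (List.drop_eq_nil_of_le hcon.le)
        have hlen_take : (it :: rest0.take j).length = m.natAbs := by
          rw [← hchunk, List.length_take]; omega
        rw [hlen_take]
        have hlen' : (its.drop m.natAbs).length ≤ N := by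
          rw [List.length_drop]; omega
        have hdvd' : m ∣ (s + ((m.natAbs : Int))) := dvd_add hdvd (Int.dvd_natAbs.mpr dvd_rfl)
        have hs' : 0 ≤ s + ((m.natAbs : Int)) := by omega
        rw [ih (its.drop m.natAbs) (s + ((m.natAbs : Int))) _ hlen' hdvd' hs' (fun _ => by omega)]
        have hsk : ¬ (s + ((m.natAbs : Int)) = 0) := by omega
        rw [if_neg hsk]
        simp only [cellsL]
        rw [hstep]
        by_cases hs0 : s = 0
        · subst hs0
          rw [if_neg (by omega : ¬ ((0 : Int) > 0)), if_pos rfl]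
          simp only [String.append_assoc, String.append_empty, String.empty_append]
        · rw [if_pos (by omega : s > 0), if_neg hs0]
          simp only [String.append_assoc, String.append_empty]

-- one of B's rows, named for the proofs (definitionally the row built in mkt_row_py_alt)
def rowOfB (tags : Option (List (Int × String))) (items : List (List (String × String))) (step : Int) (base : Int) : String :=
  "<tr>" ++ PySem.Str.join ""
      ((PySem.List.enumerate (PySem.List.slice items (some base) (some (base + step))) 0).map
        (fun q => mktCellAlt q.2 (pvTagAt tags (base + q.1))))
    ++ "</tr>"

lemma cellsJoin_eq (tags : Option (List (Int × String))) :
    ∀ (chunk : List (List (String × String))) (b j : Int),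
    PySem.Str.join "" ((PySem.List.enumerate chunk j).map (fun q => mktCellAlt q.2 (pvTagAt tags (b + q.1))))
      = cellsL tags (b + j) chunk := by
  intro chunk
  induction chunk with
  | nil => intro b j; simp [PySem.List.enumerate_nil, pvJoin_nil, cellsL]
  | cons c ct ih =>
    intro b j
    rw [PySem.List.enumerate_cons, List.map_cons, pvJoin_cons, ih b (j + 1)]
    rw [show b + (j + 1) = (b + j) + 1 from by ring]
    simp [cellsL, cellAlt_eq]

lemma joinRows_eq (tags : Option (List (Int × String))) (items : List (List (String × String)))
    (m : Int) (hm : 0 < m) :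
    ∀ (N : Nat) (b : Int), 0 ≤ b → items.length ≤ b.toNat + N →
    PySem.Str.join "" ((PySem.List.pyRange b (items.length : Int) m).map (rowOfB tags items m))
      = rowsR m.toNat tags b (items.drop b.toNat) := by
  intro N
  induction N with
  | zero =>
    intro b hb hlen
    have hnb : ¬ (b < (items.length : Int)) := by omega
    rw [PySem.List.pyRange_of_pos _ _ hm, if_neg hnb]
    rw [List.drop_eq_nil_of_le (by omega)]
    all_goals simp [pvJoin_nil, rowsR_nil]
  | succ N ih =>
    intro b hb hlen
    by_cases hbn : b < (items.length : Int)
    · rw [pvPyRange_cons _ _ _ hm hbn, List.map_cons, pvJoin_cons]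
      have hslice : PySem.List.slice items (some b) (some (b + m)) = (items.drop b.toNat).take m.toNat := by
        rw [PySem.List.slice_toNat items hb (by omega)]
        congr 1
        omega
      have hhead : rowOfB tags items m b = "<tr>" ++ cellsL tags b ((items.drop b.toNat).take m.toNat) ++ "</tr>" := by
        unfold rowOfB
        rw [hslice]
        have hcj := cellsJoin_eq tags ((items.drop b.toNat).take m.toNat) b 0
        rw [add_zero] at hcj
        rw [hcj]
      have hdd : (items.drop b.toNat).drop m.toNat = items.drop ((b + m).toNat) := by
        rw [List.drop_drop]; congr 1; omega
      have htail : PySem.Str.join "" ((PySem.List.pyRange (b + m) (items.length : Int) m).map (rowOfB tags items m))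
          = rowsR m.toNat tags (b + m) ((items.drop b.toNat).drop m.toNat) := by
        rw [ih (b + m) (by omega) (by omega), hdd]
      have hne2 : items.drop b.toNat ≠ [] := by
        intro hcon
        have hl := congrArg List.length hcon
        simp only [List.length_drop, List.length_nil] at hl
        omega
      have hcast : ((m.toNat : Int)) = m := by omega
      rw [hhead, htail, rowsR_cons _ _ _ _ hne2 (by omega), hcast]
    · rw [PySem.List.pyRange_of_pos _ _ hm, if_neg hbn]
      rw [List.drop_eq_nil_of_le (by omega)]
      all_goals simp [pvJoin_nil, rowsR_nil]

-- ===== VERDICT (by name: the statement is the Claim_ definition above) =====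
theorem mkt_row_py_spec : Claim_equal_mkt_row_py := by
  intro items tags m _ hpre
  unfold Spec_mkt_row_py
  by_cases hits : items = []
  · subst hits
    simp [mkt_row_py, mkt_row_py_alt]
  · have hm1 : 1 ≤ m := hpre.resolve_left hits
    have hm : m ≠ 0 := by omega
    have hnat : m.natAbs = m.toNat := by omega
    have hA : mkt_row_py items tags m = rowsR m.toNat tags 0 items := by
      unfold mkt_row_py
      rw [if_neg hits]
      show (PySem.List.enumerate items 0).foldl (stepA tags m) "" ++ "</tr>" = _
      rw [foldl_stepA_main tags m hm items.length items 0 "" le_rfl (dvd_zero m) le_rfl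
        (fun h => absurd h hits), hnat]
      simp [String.empty_append]
    have hB : mkt_row_py_alt items tags m = rowsR m.toNat tags 0 items := by
      unfold mkt_row_py_alt
      rw [if_neg hits]
      show PySem.Str.join ""
          (List.foldl (fun rows base => rows ++ [rowOfB tags items m base]) []
            (PySem.List.pyRange 0 (items.length : Int) m)) = _
      rw [PySem.List.foldl_append_singleton_eq_map, List.nil_append]
      have hj := joinRows_eq tags items m (by omega) items.length 0 le_rfl (by simp)
      simpa using hj
    rw [hA, hB]
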